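-- pv_equiv track=rewrite | github.com/Shrimant05/AI_TUTOR | src/main.py | _is_response_to_guiding_question
-- ===== SOURCE A (Python) =====
-- def _is_response_to_guiding_question(query: str, history) -> bool:
--     """
--     Check if the student is responding to a guiding question the tutor just asked.
--     This helps determine if a short answer deserves evaluation rather than rejection.
--     """
--     if not history: return False
--
--     # Look for the most recent tutor message containing a question
--     for turn in reversed(history or []):
--         if (turn.get("role") or "").lower() == "tutor":
--             tutor_msg = (turn.get("content") or "").strip()
--             if "?" in tutor_msg:
--                 return True
--             break
--
--     return False
-- ===== SOURCE B (Python) =====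
-- def _is_response_to_guiding_question(query: str, history) -> bool:
--     """Single forward pass with an overwrite accumulator: each tutor turn
--     overwrites the answer with whether its content holds a '?'; the value
--     left after the pass is the verdict for the last tutor turn."""
--     answer = False
--     for turn in (history or []):
--         if (turn.get("role") or "").lower() == "tutor":
--             answer = "?" in (turn.get("content") or "")
--     return answer
-- ===== Notes on version B (the rewrite author's own statement) =====
-- stated objective: simpler
-- what changed: Replaces A's reversed scan with an early break by a single forward fold that overwrites a boolean accumulator on every tutor turn, so no reversal, no break and no extra list; it also drops the redundant strip, which cannot affect '?' membership.
import Mathlib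
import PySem

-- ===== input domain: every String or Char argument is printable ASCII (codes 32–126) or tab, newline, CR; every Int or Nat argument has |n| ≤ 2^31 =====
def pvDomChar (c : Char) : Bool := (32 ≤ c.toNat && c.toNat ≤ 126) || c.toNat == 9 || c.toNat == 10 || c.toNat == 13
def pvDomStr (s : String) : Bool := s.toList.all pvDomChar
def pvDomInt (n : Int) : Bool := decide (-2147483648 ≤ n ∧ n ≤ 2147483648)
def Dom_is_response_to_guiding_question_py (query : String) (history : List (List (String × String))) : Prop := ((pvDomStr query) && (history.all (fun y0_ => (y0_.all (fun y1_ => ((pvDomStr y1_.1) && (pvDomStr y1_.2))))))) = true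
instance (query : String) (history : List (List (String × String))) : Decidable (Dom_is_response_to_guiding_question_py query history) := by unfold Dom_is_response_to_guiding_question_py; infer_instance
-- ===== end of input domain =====

-- B replaces A's reversed early-break scan by one forward fold that overwrites
-- a boolean accumulator on every tutor turn (objective: simpler).

-- ===== PORT A =====
-- the reversed-loop body of A: first turn whose role lowercases to "tutor"
-- decides the result (break after the check)
def pvALoop : List (List (String × String)) → Bool
  | [] => false
  | turn :: rest =>
    if PySem.Str.lower (PySem.Dict.getD (PySem.Dict.mk turn) "role" "") == "tutor" then
      PySem.Str.isIn "?" (PySem.Str.strip (PySem.Dict.getD (PySem.Dict.mk turn) "content" ""))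
    else pvALoop rest

def is_response_to_guiding_question_py (query : String) (history : List (List (String × String))) : Bool :=
  if history.isEmpty then false
  else pvALoop history.reverse

-- ===== PORT B =====
def is_response_to_guiding_question_py_alt (query : String) (history : List (List (String × String))) : Bool :=
  history.foldl
    (fun answer t =>
      if PySem.Str.lower (PySem.Dict.getD (PySem.Dict.mk t) "role" "") == "tutor" then
        PySem.Str.isIn "?" (PySem.Dict.getD (PySem.Dict.mk t) "content" "")
      else answer)
    false

-- ===== PRECONDITION & SPEC =====
def Spec_is_response_to_guiding_question_py (query : String) (history : List (List (String × String))) (out : Bool) : Prop := out = is_response_to_guiding_question_py_alt query history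
instance (query : String) (history : List (List (String × String))) (out : Bool) : Decidable (Spec_is_response_to_guiding_question_py query history out) := by unfold Spec_is_response_to_guiding_question_py; infer_instance

-- ===== CLAIM (what is proved, stated in full; the proofs are below) =====
def Claim_equal_is_response_to_guiding_question_py : Prop := ∀ (query : String) (history : List (List (String × String))), Dom_is_response_to_guiding_question_py query history → Spec_is_response_to_guiding_question_py query history (is_response_to_guiding_question_py query history)

-- ===== LEMMAS AND PROOFS =====

-- membership in a dropWhile-stripped list is unchanged for elements the
-- predicate rejects
theorem pv_mem_dropWhile_iff (a : Char) (l : List Char) (p : Char → Bool)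
    (h : p a = false) : a ∈ l.dropWhile p ↔ a ∈ l := by
  constructor
  · exact fun hm => List.dropWhile_sublist p |>.mem hm
  · intro hm
    induction l with
    | nil => simp at hm
    | cons x t ih =>
      by_cases hx : p x
      · rw [List.dropWhile_cons_of_pos hx]
        rcases List.mem_cons.mp hm with rfl | hm'
        · rw [h] at hx; exact absurd hx (by simp)
        · exact ih hm'
      · rw [List.dropWhile_cons_of_neg hx]; exact hm

-- stripping whitespace cannot remove a '?'
theorem pv_isIn_q_strip (s : String) :
    PySem.Str.isIn "?" (PySem.Str.strip s) = PySem.Str.isIn "?" s := by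
  have hq : PySem.Chars.isspace '?' = false := by decide
  have key : ∀ l : List Char,
      PySem.Chars.isIn ['?'] (PySem.Chars.strip l) = PySem.Chars.isIn ['?'] l := by
    intro l
    have h1 : ('?' ∈ PySem.Chars.strip l) ↔ ('?' ∈ l) := by
      unfold PySem.Chars.strip PySem.Chars.rstrip PySem.Chars.lstrip
      rw [List.mem_reverse, pv_mem_dropWhile_iff _ _ _ hq, List.mem_reverse,
        pv_mem_dropWhile_iff _ _ _ hq]
    rw [Bool.eq_iff_iff, PySem.Chars.isIn_iff_infix, PySem.Chars.isIn_iff_infix,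
      List.singleton_infix_iff, List.singleton_infix_iff]
    exact h1
  have := key s.toList
  simpa [PySem.Str.isIn, PySem.Str.toList_strip] using this

-- B's overwrite fold, from any accumulator, equals "check the last matching
-- turn, else keep the accumulator"
theorem pv_fold_last (l : List (List (String × String))) (acc : Bool) :
    l.foldl
      (fun answer t =>
        if PySem.Str.lower (PySem.Dict.getD (PySem.Dict.mk t) "role" "") == "tutor" then
          PySem.Str.isIn "?" (PySem.Dict.getD (PySem.Dict.mk t) "content" "")
        else answer)
      acc
    = (match l.reverse.find?
        (fun t => PySem.Str.lower (PySem.Dict.getD (PySem.Dict.mk t) "role" "") == "tutor") with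
      | none => acc
      | some t => PySem.Str.isIn "?" (PySem.Dict.getD (PySem.Dict.mk t) "content" "")) := by
  induction l generalizing acc with
  | nil => rfl
  | cons x rest ih =>
    simp only [List.foldl_cons, ih, List.reverse_cons, List.find?_append]
    cases hr : rest.reverse.find?
        (fun t => PySem.Str.lower (PySem.Dict.getD (PySem.Dict.mk t) "role" "") == "tutor") with
    | some t => simp
    | none =>
      simp only [Option.none_or]
      by_cases hx : (PySem.Str.lower (PySem.Dict.getD (PySem.Dict.mk x) "role" "") == "tutor") = true
      · simp [List.find?, hx]
      · simp [List.find?, Bool.eq_false_iff.mpr hx]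

-- A's loop is "check the first matching turn"
theorem pv_aLoop_find? (l : List (List (String × String))) :
    pvALoop l = (match l.find?
        (fun t => PySem.Str.lower (PySem.Dict.getD (PySem.Dict.mk t) "role" "") == "tutor") with
      | none => false
      | some t => PySem.Str.isIn "?" (PySem.Dict.getD (PySem.Dict.mk t) "content" "")) := by
  induction l with
  | nil => rfl
  | cons x t ih =>
    simp only [pvALoop]
    by_cases hx : (PySem.Str.lower (PySem.Dict.getD (PySem.Dict.mk x) "role" "") == "tutor") = true
    · rw [if_pos hx, List.find?_cons_of_pos (p := fun t => PySem.Str.lower (PySem.Dict.getD (PySem.Dict.mk t) "role" "") == "tutor") hx]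
      exact pv_isIn_q_strip _
    · rw [if_neg hx, List.find?_cons_of_neg (p := fun t => PySem.Str.lower (PySem.Dict.getD (PySem.Dict.mk t) "role" "") == "tutor") (by simpa using hx), ih]

-- ===== VERDICT (by name: the statement is the Claim_ definition above) =====
theorem is_response_to_guiding_question_py_spec : Claim_equal_is_response_to_guiding_question_py := by
  intro query history _
  unfold Spec_is_response_to_guiding_question_py
  unfold is_response_to_guiding_question_py is_response_to_guiding_question_py_alt
  rw [pv_fold_last]
  by_cases hh : history.isEmpty = true
  · rw [List.isEmpty_iff.mp hh]; rfl
  · rw [if_neg hh, pv_aLoop_find?]
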